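-- pv_equiv track=rewrite | github.com/Donut1Waffle2Pancake3/data-tools | scripts/site-audit/audit.py | split_queue
-- ===== SOURCE A (Python) =====
-- def split_queue(text: str) -> tuple[list[str], list[str]]:
--     lines = text.splitlines()
--     first_path_idx = None
--     for i, line in enumerate(lines):
--         s = line.strip()
--         if s and not s.startswith("#"):
--             first_path_idx = i
--             break
--     if first_path_idx is None:
--         return lines, []
--     header_lines = lines[:first_path_idx]
--     paths: list[str] = []
--     for line in lines[first_path_idx:]:
--         s = line.strip()
--         if s and not s.startswith("#"):
--             paths.append(s)
--     return header_lines, paths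
-- ===== SOURCE B (Python) =====
-- def split_queue(text: str) -> tuple[list[str], list[str]]:
--     header: list[str] = []
--     paths: list[str] = []
--     found = False
--     for line in text.splitlines():
--         s = line.strip()
--         if s and not s.startswith("#"):
--             found = True
--             paths.append(s)
--         elif not found:
--             header.append(line)
--     return header, paths
-- ===== Notes on version B (the rewrite author's own statement) =====
-- stated objective: simpler
-- what changed: Replaced the find-first-index search plus slicing and a second rescan with a single state-machine pass over the lines that maintains a seen-a-path flag and builds header and paths in one traversal.
import Mathlib
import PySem

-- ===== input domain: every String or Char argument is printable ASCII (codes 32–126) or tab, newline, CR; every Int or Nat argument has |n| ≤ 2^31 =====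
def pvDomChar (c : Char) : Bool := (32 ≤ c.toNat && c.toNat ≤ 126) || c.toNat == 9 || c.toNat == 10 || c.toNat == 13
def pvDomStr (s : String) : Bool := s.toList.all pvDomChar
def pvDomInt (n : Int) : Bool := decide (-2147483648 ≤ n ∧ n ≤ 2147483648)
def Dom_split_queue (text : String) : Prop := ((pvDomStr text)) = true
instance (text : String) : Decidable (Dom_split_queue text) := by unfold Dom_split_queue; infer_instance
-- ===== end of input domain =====

-- B replaces A's find-index-then-slice-and-rescan with a single state-machine pass (simpler decomposition).


-- ===== PORT A =====
-- 'if s and not s.startswith("#")' for s = line.strip()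
def pvIsPath (line : String) : Bool :=
  let s := PySem.Str.strip line
  decide (s ≠ "") && !(PySem.Str.startswith s "#")

-- the enumerate loop with break: first index (counter starts at i) whose line is a path
def pvFindIdx (i : Nat) (ls : List String) : Option Nat :=
  match ls with
  | [] => none
  | l :: tl => if pvIsPath l then some i else pvFindIdx (i + 1) tl

-- the second loop: collect stripped path lines
def pvCollect (ls : List String) : List String :=
  ls.foldl (fun acc l =>
    let s := PySem.Str.strip l
    if pvIsPath l then acc ++ [s] else acc) []

def split_queue (text : String) : List String × List String :=
  let lines := PySem.Str.splitlines text
  match pvFindIdx 0 lines with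
  | none => (lines, [])
  | some i => (lines.take i, pvCollect (lines.drop i))  -- lines[:i], lines[i:] with 0 ≤ i

-- ===== PORT B =====
def pvStep (st : Bool × List String × List String) (line : String) : Bool × List String × List String :=
  let (found, header, paths) := st
  let s := PySem.Str.strip line
  if decide (s ≠ "") && !(PySem.Str.startswith s "#") then
    (true, header, paths ++ [s])
  else if !found then
    (found, header ++ [line], paths)
  else
    (found, header, paths)

def split_queue_alt (text : String) : List String × List String :=
  let st := (PySem.Str.splitlines text).foldl pvStep (false, [], [])
  (st.2.1, st.2.2)

-- ===== PRECONDITION & SPEC =====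
def Spec_split_queue (text : String) (out : List String × List String) : Prop := out = split_queue_alt text
instance (text : String) (out : List String × List String) : Decidable (Spec_split_queue text out) := by unfold Spec_split_queue; infer_instance

-- ===== CLAIM (what is proved, stated in full; the proofs are below) =====
def Claim_equal_split_queue : Prop := ∀ (text : String), Dom_split_queue text → Spec_split_queue text (split_queue text)

-- ===== LEMMAS AND PROOFS =====

lemma pvStep_eq (st : Bool × List String × List String) (l : String) :
    pvStep st l =
      if pvIsPath l then (true, st.2.1, st.2.2 ++ [PySem.Str.strip l])
      else if !st.1 then (st.1, st.2.1 ++ [l], st.2.2)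
      else st := by
  obtain ⟨f, h, p⟩ := st
  simp only [pvStep, pvIsPath]

lemma pvCollect_eq (ls : List String) :
    pvCollect ls = (ls.filter pvIsPath).map PySem.Str.strip := by
  simp [pvCollect, PySem.List.foldl_append_if]

-- once found = true, B only accumulates paths
lemma foldB_true (ls : List String) (h p : List String) :
    ls.foldl pvStep (true, h, p) = (true, h, p ++ pvCollect ls) := by
  induction ls generalizing p with
  | nil => simp [pvCollect]
  | cons l tl ih =>
    by_cases hl : pvIsPath l
    · simp [pvStep_eq, hl, ih, pvCollect, PySem.List.foldl_append_if]
    · simp [pvStep_eq, hl, ih, pvCollect, PySem.List.foldl_append_if]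

lemma foldB_false (ls : List String) (h p : List String) :
    ls.foldl pvStep (false, h, p)
      = ((ls.foldl pvStep (false, [], [])).1,
         h ++ (ls.foldl pvStep (false, [], [])).2.1,
         p ++ (ls.foldl pvStep (false, [], [])).2.2) := by
  induction ls generalizing h p with
  | nil => simp
  | cons l tl ih =>
    by_cases hl : pvIsPath l
    · simp only [List.foldl_cons, pvStep_eq, hl, if_pos]
      rw [foldB_true, foldB_true]
      simp
    · simp only [List.foldl_cons, pvStep_eq, hl, if_neg, Bool.not_false, if_pos,
        Bool.false_eq_true, not_false_iff]
      rw [ih, List.nil_append, ih [l] []]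
      simp

lemma pvFindIdx_shift (n : Nat) (ls : List String) :
    pvFindIdx n ls = (pvFindIdx 0 ls).map (· + n) := by
  induction ls generalizing n with
  | nil => simp [pvFindIdx]
  | cons l tl ih =>
    by_cases hl : pvIsPath l
    · simp [pvFindIdx, hl]
    · simp only [pvFindIdx, hl, Bool.false_eq_true, not_false_iff, if_neg]
      rw [ih (n + 1), ih 1]
      cases pvFindIdx 0 tl <;> simp <;> omega

-- A's slice form equals B's fold on any line list
lemma split_eq (ls : List String) :
    (match pvFindIdx 0 ls with
      | none => (ls, ([] : List String))
      | some i => (ls.take i, pvCollect (ls.drop i)))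
      = ((ls.foldl pvStep (false, [], [])).2.1, (ls.foldl pvStep (false, [], [])).2.2) := by
  induction ls with
  | nil => simp [pvFindIdx]
  | cons l tl ih =>
    by_cases hl : pvIsPath l
    · simp only [pvFindIdx, hl, if_pos, List.foldl_cons, pvStep_eq]
      rw [foldB_true]
      simp [pvCollect_eq, hl]
    · simp only [pvFindIdx, hl, Bool.false_eq_true, not_false_iff, if_neg,
        List.foldl_cons, pvStep_eq, Bool.not_false, ite_true]
      rw [pvFindIdx_shift 1, List.nil_append, foldB_false tl [l] []]
      have hcoll : pvCollect (l :: tl) = pvCollect tl := by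
        simp [pvCollect_eq, hl]
      cases hfi : pvFindIdx 0 tl with
      | none =>
        rw [hfi] at ih
        have h1 := congrArg Prod.fst ih
        have h2 := congrArg Prod.snd ih
        simp only at h1 h2
        simp only [Option.map_none]
        exact Prod.ext (by simp [← h1]) (by simp [← h2])
      | some i =>
        rw [hfi] at ih
        have h1 := congrArg Prod.fst ih
        have h2 := congrArg Prod.snd ih
        simp only at h1 h2
        simp only [Option.map_some, List.take_succ_cons, List.drop_succ_cons, List.nil_append]
        exact Prod.ext (by simp [h1]) h2

-- ===== VERDICT (by name: the statement is the Claim_ definition above) =====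
theorem split_queue_spec : Claim_equal_split_queue := by
  intro text _
  unfold Spec_split_queue split_queue split_queue_alt
  have := split_eq (PySem.Str.splitlines text)
  cases hfi : pvFindIdx 0 (PySem.Str.splitlines text) <;> simp [hfi] at this ⊢ <;> exact this
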